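-- pv_equiv track=rewrite | github.com/Capta7nBlack/RegisterBot | reader.py | dict_reader_recitation
-- ===== SOURCE A (Python) =====
-- def dict_reader_recitation(dict,course):
--
--     sections = []
--
--     inside_keys = list(dict[course].keys())
--
--     values = list(dict[course].values())
--
--     for idx, inside_key in enumerate(inside_keys):
--
--         if inside_keys[idx] == 'recitation':
--             sections.append(f'Section {values[idx]}')
--             return sections[0]
--     else:
--         return None
-- ===== SOURCE B (Python) =====
-- def dict_reader_recitation(dict, course):
--     inner = dict[course]
--     if 'recitation' in inner:
--         return f'Section {inner["recitation"]}'
--     return None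
-- ===== Notes on version B (the rewrite author's own statement) =====
-- stated objective: idiomatic
-- what changed: B drops the parallel keys/values lists and the enumerate+index scan, using a direct membership test and key lookup on the inner dict instead.
import Mathlib
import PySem

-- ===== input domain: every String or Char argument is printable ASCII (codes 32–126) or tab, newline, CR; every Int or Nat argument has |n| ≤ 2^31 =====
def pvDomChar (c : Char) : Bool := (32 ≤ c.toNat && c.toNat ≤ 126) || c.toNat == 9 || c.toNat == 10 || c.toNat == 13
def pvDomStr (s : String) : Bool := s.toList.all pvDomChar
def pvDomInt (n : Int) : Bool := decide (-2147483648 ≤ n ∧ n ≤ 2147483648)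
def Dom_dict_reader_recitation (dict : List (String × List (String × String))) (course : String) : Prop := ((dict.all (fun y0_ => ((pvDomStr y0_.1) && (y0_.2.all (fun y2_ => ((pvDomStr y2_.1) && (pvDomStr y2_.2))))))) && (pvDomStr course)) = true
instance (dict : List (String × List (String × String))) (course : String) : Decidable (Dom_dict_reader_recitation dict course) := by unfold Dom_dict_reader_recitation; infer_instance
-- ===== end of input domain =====

-- B replaces A's parallel key/value lists and indexed enumerate-scan with a direct
-- membership test and lookup on the inner dict (idiomatic); return values proved equal
-- whenever course is a key of dict (A raises KeyError otherwise).


-- shared primitive: Python's dict[k] / 'k in d' on the association-list representation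
-- (first match; Python dicts have unique keys, so this is exact)
def pvAssocGet? {ν : Type} (l : List (String × ν)) (k : String) : Option ν :=
  match l with
  | [] => none
  | (k', v) :: rest => if k' == k then some v else pvAssocGet? rest k

-- ===== PORT A =====
-- the 'for idx, inside_key in enumerate(inside_keys)' loop with its early return;
-- inside_keys[idx] / values[idx] ported with pyGet? (getD "" is unreachable: idx is in range)
def pvALoop (keys values : List String) : List (Int × String) → Option String
  | [] => none
  | (idx, _inside_key) :: rest =>
    if PySem.List.pyGet? keys idx == some "recitation" then
      some ("Section " ++ (PySem.List.pyGet? values idx).getD "")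
    else pvALoop keys values rest

def dict_reader_recitation (dict : List (String × List (String × String))) (course : String) : Option String :=
  match pvAssocGet? dict course with
  | none => none   -- Python raises KeyError here; excluded by Pre_
  | some inner =>
    let inside_keys := inner.map (·.1)
    let values := inner.map (·.2)
    pvALoop inside_keys values (PySem.List.enumerate inside_keys)

-- ===== PORT B =====
def dict_reader_recitation_alt (dict : List (String × List (String × String))) (course : String) : Option String :=
  match pvAssocGet? dict course with
  | none => none   -- Python raises KeyError here; excluded by Pre_
  | some inner => (pvAssocGet? inner "recitation").map (fun v => "Section " ++ v)

-- ===== PRECONDITION & SPEC =====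
-- Pre_: course must be a key of dict; otherwise Python's dict[course] raises KeyError.
def Pre_dict_reader_recitation (dict : List (String × List (String × String))) (course : String) : Prop :=
  (dict.any (fun p => p.1 == course)) = true
instance (dict : List (String × List (String × String))) (course : String) : Decidable (Pre_dict_reader_recitation dict course) := by unfold Pre_dict_reader_recitation; infer_instance

def pvWitness_dict_reader_recitation : (List (String × List (String × String))) × String :=
  ([("math", [("lecture", "1"), ("recitation", "3")])], "math")

def Spec_dict_reader_recitation (dict : List (String × List (String × String))) (course : String) (out : Option String) : Prop := out = dict_reader_recitation_alt dict course
instance (dict : List (String × List (String × String))) (course : String) (out : Option String) : Decidable (Spec_dict_reader_recitation dict course out) := by unfold Spec_dict_reader_recitation; infer_instance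

-- ===== CLAIM (what is proved, stated in full; the proofs are below) =====
def Claim_equal_dict_reader_recitation : Prop := ∀ (dict : List (String × List (String × String))) (course : String), Dom_dict_reader_recitation dict course → Pre_dict_reader_recitation dict course → Spec_dict_reader_recitation dict course (dict_reader_recitation dict course)

-- ===== LEMMAS AND PROOFS =====

-- A's indexed scan over the enumerate of the keys list, started after any equal-length
-- prefix of consumed keys/values, computes B's first-match lookup on the remaining pairs.
theorem pvALoop_eq (inner : List (String × String)) :
    ∀ (preK preV : List String), preK.length = preV.length →
    pvALoop (preK ++ inner.map (·.1)) (preV ++ inner.map (·.2))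
        (PySem.List.enumerate (inner.map (·.1)) preK.length) =
      (pvAssocGet? inner "recitation").map (fun v => "Section " ++ v) := by
  induction inner with
  | nil => intro preK preV _; simp [PySem.List.enumerate_nil, pvALoop, pvAssocGet?]
  | cons p rest ih =>
    intro preK preV hlen
    obtain ⟨k, v⟩ := p
    rw [List.map_cons, PySem.List.enumerate_cons, List.map_cons]
    show pvALoop _ _ _ = _
    rw [pvALoop]
    have hk : PySem.List.pyGet? (preK ++ k :: rest.map (·.1)) (preK.length : Int) = some k :=
      PySem.List.pyGet?_append_length preK _ k
    have hv : PySem.List.pyGet? (preV ++ v :: rest.map (·.2)) (preK.length : Int) = some v := by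
      rw [show (preK.length : Int) = (preV.length : Int) by exact_mod_cast hlen]
      exact PySem.List.pyGet?_append_length preV _ v
    rw [hk, hv]
    by_cases hkr : k = "recitation"
    · subst hkr; simp [pvAssocGet?]
    · have : (some k == some "recitation") = false := by
        simp [hkr]
      rw [this]
      simp only [if_false, Bool.false_eq_true]
      have := ih (preK ++ [k]) (preV ++ [v]) (by simp [hlen])
      simp only [List.append_assoc, List.singleton_append, List.length_append,
        List.length_singleton] at this
      have hcast : ((preK.length : Int) + 1) = ((preK.length + 1 : Nat) : Int) := by push_cast; ring
      rw [hcast]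
      rw [this]
      simp [pvAssocGet?, hkr]

-- ===== VERDICT (by name: the statement is the Claim_ definition above) =====
theorem dict_reader_recitation_spec : Claim_equal_dict_reader_recitation := by
  intro dict course _hdom _hpre
  unfold Spec_dict_reader_recitation dict_reader_recitation dict_reader_recitation_alt
  cases h : pvAssocGet? dict course with
  | none => rfl
  | some inner =>
    simpa using pvALoop_eq inner [] [] rfl
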